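-- pv_equiv track=rewrite | github.com/MrBrantCode/unitest_baseline | mut_generate/mist_train_taco/taco_5470/solution.py | are_polygons_similar
-- ===== SOURCE A (Python) =====
-- def are_polygons_similar(n, vertices):
--     if n % 2 != 0:
--         return "NO"
--
--     a = [0] * n
--     x1, y1 = vertices[0]
--     x11, y11 = x1, y1
--
--     for i in range(1, n):
--         x2, y2 = vertices[i]
--         a[i-1] = [x2 - x1, y2 - y1]
--         x1, y1 = x2, y2
--
--     a[n-1] = [x11 - x2, y11 - y2]
--
--     fl = True
--     for i in range(n // 2):
--         if not (a[i][0] == -a[n // 2 + i][0] and a[i][1] == -a[n // 2 + i][1]):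
--             fl = False
--             break
--
--     return "YES" if fl else "NO"
-- ===== SOURCE B (Python) =====
-- def are_polygons_similar(n, vertices):
--     if n % 2 != 0:
--         return "NO"
--     half = n // 2
--     sx = vertices[0][0] + vertices[half][0]
--     sy = vertices[0][1] + vertices[half][1]
--     for i in range(half):
--         if vertices[i][0] + vertices[i + half][0] != sx or vertices[i][1] + vertices[i + half][1] != sy:
--             return "NO"
--     return "YES"
-- ===== Notes on version B (the rewrite author's own statement) =====
-- stated objective: simpler
-- what changed: B drops A's edge-vector array entirely: instead of building all n edge differences and then comparing opposite edges for negation, B checks in one pass that every opposite vertex pair (i, i+n/2) has the same coordinate sum as the pair (0, n/2), i.e. a common center of symmetry.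
import Mathlib
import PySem

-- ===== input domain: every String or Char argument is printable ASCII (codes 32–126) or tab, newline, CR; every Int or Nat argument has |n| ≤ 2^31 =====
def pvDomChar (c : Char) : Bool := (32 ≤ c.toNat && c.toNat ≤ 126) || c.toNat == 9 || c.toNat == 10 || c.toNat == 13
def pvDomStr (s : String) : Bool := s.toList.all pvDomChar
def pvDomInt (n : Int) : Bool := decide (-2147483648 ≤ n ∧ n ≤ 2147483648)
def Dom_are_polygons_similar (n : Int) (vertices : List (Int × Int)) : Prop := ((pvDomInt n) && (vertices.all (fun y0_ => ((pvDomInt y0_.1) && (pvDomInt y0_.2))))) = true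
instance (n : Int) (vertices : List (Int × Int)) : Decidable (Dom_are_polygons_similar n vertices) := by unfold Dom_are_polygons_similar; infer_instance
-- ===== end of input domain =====

-- B replaces A's two-pass edge-vector construction by a single pass checking that opposite
-- vertices share one common vertex-pair sum (center of symmetry); objective: simpler.

-- ===== PORT A =====
-- first loop of A: builds the edge array a and carries (x1, y1) = last read vertex
def pvA_loop1 (vertices : List (Int × Int)) : List Int → List (Int × Int) → Int → Int → (List (Int × Int) × Int × Int)
  | [], a, x1, y1 => (a, x1, y1)
  | i :: rest, a, x1, y1 =>
    match PySem.List.pyGet? vertices i with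
    | none => (a, x1, y1)      -- Python raises IndexError here; excluded by Pre_
    | some (x2, y2) => pvA_loop1 vertices rest (PySem.List.pySetD a (i - 1) (x2 - x1, y2 - y1)) x2 y2

-- second loop of A: the break-on-first-failure check over range(n // 2)
def pvA_check (a : List (Int × Int)) (h : Int) : List Int → Bool
  | [] => true
  | i :: rest =>
    match PySem.List.pyGet? a i, PySem.List.pyGet? a (h + i) with
    | some (ax, ay), some (bx, by_) =>
        if ax = -bx ∧ ay = -by_ then pvA_check a h rest else false
    | _, _ => false            -- IndexError; unreachable under Pre_

def are_polygons_similar (n : Int) (vertices : List (Int × Int)) : String :=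
  if PySem.Int.mod n 2 ≠ 0 then "NO"
  else
    match PySem.List.pyGet? vertices 0 with
    | none => "NO"             -- Python raises IndexError (vertices[0]); excluded by Pre_
    | some (x1, y1) =>
      -- a = [0] * n : the placeholders are all overwritten before being read under Pre_
      let a0 : List (Int × Int) := List.replicate n.toNat (0, 0)
      match pvA_loop1 vertices (PySem.List.pyRange 1 n 1) a0 x1 y1 with
      | (a1, x2, y2) =>
        let a2 := PySem.List.pySetD a1 (n - 1) (x1 - x2, y1 - y2)   -- a[n-1] = [x11 - x2, y11 - y2]
        if pvA_check a2 (PySem.Int.floordiv n 2) (PySem.List.pyRange 0 (PySem.Int.floordiv n 2) 1)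
        then "YES" else "NO"

-- ===== PORT B =====
def pvB_loop (vertices : List (Int × Int)) (half sx sy : Int) : List Int → String
  | [] => "YES"
  | i :: rest =>
    match PySem.List.pyGet? vertices i, PySem.List.pyGet? vertices (i + half) with
    | some (x, y), some (x2, y2) =>
        if x + x2 ≠ sx ∨ y + y2 ≠ sy then "NO" else pvB_loop vertices half sx sy rest
    | _, _ => "NO"             -- IndexError; unreachable under Pre_

def are_polygons_similar_alt (n : Int) (vertices : List (Int × Int)) : String :=
  if PySem.Int.mod n 2 ≠ 0 then "NO"
  else
    let half := PySem.Int.floordiv n 2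
    match PySem.List.pyGet? vertices 0, PySem.List.pyGet? vertices half with
    | some (x0, y0), some (xh, yh) =>
        pvB_loop vertices half (x0 + xh) (y0 + yh) (PySem.List.pyRange 0 half 1)
    | _, _ => "NO"             -- IndexError; excluded by Pre_

-- ===== PRECONDITION & SPEC =====
-- Pre_ excludes exactly the inputs where Python A raises: even n with n < 2 (NameError: x2
-- unbound / IndexError on empty list) or fewer than n vertices (IndexError).
def Pre_are_polygons_similar (n : Int) (vertices : List (Int × Int)) : Prop :=
  PySem.Int.mod n 2 ≠ 0 ∨ (2 ≤ n ∧ n ≤ (vertices.length : Int))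
instance (n : Int) (vertices : List (Int × Int)) : Decidable (Pre_are_polygons_similar n vertices) := by unfold Pre_are_polygons_similar; infer_instance

def pvWitness_are_polygons_similar : Int × (List (Int × Int)) := (4, [(0,0),(1,0),(1,1),(0,1)])

def Spec_are_polygons_similar (n : Int) (vertices : List (Int × Int)) (out : String) : Prop := out = are_polygons_similar_alt n vertices
instance (n : Int) (vertices : List (Int × Int)) (out : String) : Decidable (Spec_are_polygons_similar n vertices out) := by unfold Spec_are_polygons_similar; infer_instance

-- ===== CLAIM (what is proved, stated in full; the proofs are below) =====
def Claim_equal_are_polygons_similar : Prop := ∀ (n : Int) (vertices : List (Int × Int)), Dom_are_polygons_similar n vertices → Pre_are_polygons_similar n vertices → Spec_are_polygons_similar n vertices (are_polygons_similar n vertices)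

-- ===== LEMMAS AND PROOFS =====
-- vertex j (read with a default; all reads are in range under Pre_)
def pvG (v : List (Int × Int)) (j : Nat) : Int × Int := v.getD j (0, 0)

-- vertex-pair sum s j = v[j] + v[j + half], the quantity B compares
def pvS (v : List (Int × Int)) (hf j : Nat) : Int × Int :=
  ((pvG v j).1 + (pvG v (j + hf)).1, (pvG v j).2 + (pvG v (j + hf)).2)

lemma pvGet_nat (v : List (Int × Int)) (j : Nat) (hj : j < v.length) :
    PySem.List.pyGet? v (j : Int) = some (pvG v j) := by
  simp [PySem.List.pyGet?_natCast, pvG, List.getD, List.getElem?_eq_getElem hj]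

-- chain lemma: all successive steps equal ↔ everything equals the first
lemma pvChain {α : Type} (f : Nat → α) (k : Nat) :
    (∀ i : Nat, i + 1 < k → f (i+1) = f i) ↔ (∀ i : Nat, i < k → f i = f 0) := by
  constructor
  · intro hstep i hi
    induction i with
    | zero => rfl
    | succ j ihj => exact (hstep j hi).trans (ihj (by omega))
  · intro hall i hi
    exact (hall (i+1) hi).trans (hall i (by omega)).symm

lemma pvB_loop_yes_or_no (v : List (Int × Int)) (half sx sy : Int) (is : List Int) :
    pvB_loop v half sx sy is = "YES" ∨ pvB_loop v half sx sy is = "NO" := by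
  induction is with
  | nil => left; rfl
  | cons i rest ih =>
    simp only [pvB_loop]
    cases hv : PySem.List.pyGet? v i with
    | none => simp
    | some p =>
      obtain ⟨x, y⟩ := p
      cases hw : PySem.List.pyGet? v (i + half) with
      | none => simp
      | some q =>
        obtain ⟨x2, y2⟩ := q
        dsimp only
        split
        · right; rfl
        · exact ih

lemma pvB_loop_iff_aux (v : List (Int × Int)) (half sx sy : Int) :
    ∀ (N : Nat) (lo hi : Int), (hi - lo).toNat = N →
    (pvB_loop v half sx sy (PySem.List.pyRange lo hi 1) = "YES" ↔
      ∀ i : Int, lo ≤ i → i < hi →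
        ∃ p q, PySem.List.pyGet? v i = some p ∧ PySem.List.pyGet? v (i + half) = some q ∧
          p.1 + q.1 = sx ∧ p.2 + q.2 = sy) := by
  intro N
  induction N with
  | zero =>
    intro lo hi hN
    rw [PySem.List.pyRange_one_eq_nil (by omega)]
    simp only [pvB_loop]
    constructor
    · intro _ i h1 h2; omega
    · intro _; trivial
  | succ N ih =>
    intro lo hi hN
    rw [PySem.List.pyRange_one_cons (by omega)]
    simp only [pvB_loop]
    cases hv : PySem.List.pyGet? v lo with
    | none =>
      constructor
      · intro h; exact absurd h (by simp)
      · intro h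
        obtain ⟨p, q, hp, _⟩ := h lo le_rfl (by omega)
        simp [hv] at hp
    | some p =>
      obtain ⟨x, y⟩ := p
      cases hw : PySem.List.pyGet? v (lo + half) with
      | none =>
        constructor
        · intro h; exact absurd h (by simp)
        · intro h
          obtain ⟨p, q, hp, hq, _⟩ := h lo le_rfl (by omega)
          simp [hw] at hq
      | some q =>
        obtain ⟨x2, y2⟩ := q
        dsimp only
        split
        · rename_i hcond
          constructor
          · intro h; exact absurd h (by simp)
          · intro h
            obtain ⟨p, q, hp, hq, h1, h2⟩ := h lo le_rfl (by omega)
            rw [hv] at hp; rw [hw] at hq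
            cases hp; cases hq
            simp at h1 h2
            rcases hcond with hc | hc <;> [exact (hc h1).elim; exact (hc h2).elim]
        · rename_i hcond
          obtain ⟨hcx, hcy⟩ := not_or.mp hcond
          rw [ih (lo + 1) hi (by omega)]
          constructor
          · intro h i h1 h2
            rcases eq_or_lt_of_le h1 with rfl | hlt
            · exact ⟨(x, y), (x2, y2), hv, hw, not_not.mp hcx, not_not.mp hcy⟩
            · exact h i (by omega) h2
          · intro h i h1 h2
            exact h i (by omega) h2


lemma pvA_check_iff_aux (a : List (Int × Int)) (h : Int) :
    ∀ (N : Nat) (lo hi : Int), (hi - lo).toNat = N →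
    (pvA_check a h (PySem.List.pyRange lo hi 1) = true ↔
      ∀ i : Int, lo ≤ i → i < hi →
        ∃ p q, PySem.List.pyGet? a i = some p ∧ PySem.List.pyGet? a (h + i) = some q ∧
          p.1 = -q.1 ∧ p.2 = -q.2) := by
  intro N
  induction N with
  | zero =>
    intro lo hi hN
    rw [PySem.List.pyRange_one_eq_nil (by omega)]
    simp only [pvA_check]
    constructor
    · intro _ i h1 h2; omega
    · intro _; trivial
  | succ N ih =>
    intro lo hi hN
    rw [PySem.List.pyRange_one_cons (by omega)]
    simp only [pvA_check]
    cases hv : PySem.List.pyGet? a lo with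
    | none =>
      constructor
      · intro hcl; exact absurd hcl (by simp)
      · intro hcl
        obtain ⟨p, q, hp, _⟩ := hcl lo le_rfl (by omega)
        simp [hv] at hp
    | some p =>
      obtain ⟨ax, ay⟩ := p
      cases hw : PySem.List.pyGet? a (h + lo) with
      | none =>
        constructor
        · intro hcl; exact absurd hcl (by simp)
        · intro hcl
          obtain ⟨p, q, hp, hq, _⟩ := hcl lo le_rfl (by omega)
          simp [hw] at hq
      | some q =>
        obtain ⟨bx, by_⟩ := q
        dsimp only
        split
        · rename_i hcond
          rw [ih (lo + 1) hi (by omega)]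
          constructor
          · intro hcl i h1 h2
            rcases eq_or_lt_of_le h1 with rfl | hlt
            · exact ⟨(ax, ay), (bx, by_), hv, hw, hcond.1, hcond.2⟩
            · exact hcl i (by omega) h2
          · intro hcl i h1 h2
            exact hcl i (by omega) h2
        · rename_i hcond
          constructor
          · intro hcl; exact absurd hcl (by simp)
          · intro hcl
            obtain ⟨p, q, hp, hq, h1, h2⟩ := hcl lo le_rfl (by omega)
            rw [hv] at hp; rw [hw] at hq
            cases hp; cases hq
            simp at h1 h2
            exact (hcond ⟨h1, h2⟩).elim


lemma pvA_loop1_spec (v : List (Int × Int)) (m : Nat) (hm : m ≤ v.length) :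
    ∀ (N : Nat) (k : Nat) (a : List (Int × Int)), m - k = N → 1 ≤ k → k ≤ m → a.length = m →
    (pvA_loop1 v (PySem.List.pyRange (k : Int) (m : Int) 1) a (pvG v (k-1)).1 (pvG v (k-1)).2).2.1
        = (pvG v (m-1)).1 ∧
    (pvA_loop1 v (PySem.List.pyRange (k : Int) (m : Int) 1) a (pvG v (k-1)).1 (pvG v (k-1)).2).2.2
        = (pvG v (m-1)).2 ∧
    (pvA_loop1 v (PySem.List.pyRange (k : Int) (m : Int) 1) a (pvG v (k-1)).1 (pvG v (k-1)).2).1.length = m ∧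
    ∀ j : Nat,
      (pvA_loop1 v (PySem.List.pyRange (k : Int) (m : Int) 1) a (pvG v (k-1)).1 (pvG v (k-1)).2).1.getD j (0,0)
        = if k - 1 ≤ j ∧ j < m - 1
          then ((pvG v (j+1)).1 - (pvG v j).1, (pvG v (j+1)).2 - (pvG v j).2)
          else a.getD j (0,0) := by
  intro N
  induction N with
  | zero =>
    intro k a hN hk1 hkm ha
    have hk : k = m := by omega
    subst hk
    rw [PySem.List.pyRange_one_eq_nil (by omega)]
    simp only [pvA_loop1]
    refine ⟨trivial, trivial, ha, ?_⟩
    intro j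
    have hcl : ¬ (k - 1 ≤ j ∧ j < k - 1) := by omega
    simp only [if_neg hcl]
  | succ N ih =>
    intro k a hN hk1 hkm ha
    have hkm' : k < m := by omega
    rw [PySem.List.pyRange_one_cons (by exact_mod_cast hkm')]
    simp only [pvA_loop1]
    rcases hpg : pvG v k with ⟨gx, gy⟩
    have hget : PySem.List.pyGet? v (k : Int) = some (gx, gy) := by
      have hk : k < v.length := by omega
      rw [← hpg]
      simp [PySem.List.pyGet?_natCast, pvG, List.getD, List.getElem?_eq_getElem hk]
    rw [hget]
    dsimp only
    have hcast : ((k : Int) - 1) = ((k - 1 : Nat) : Int) := by omega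
    have hset : PySem.List.pySetD a ((k : Int) - 1) (gx - (pvG v (k-1)).1, gy - (pvG v (k-1)).2)
        = a.set (k-1) (gx - (pvG v (k-1)).1, gy - (pvG v (k-1)).2) := by
      rw [hcast, PySem.List.pySetD_natCast]
    have hcast2 : ((k : Int) + 1) = (((k+1 : Nat)) : Int) := by omega
    have step := ih (k+1) (a.set (k-1) (gx - (pvG v (k-1)).1, gy - (pvG v (k-1)).2))
        (by omega) (by omega) (by omega) (by simpa using ha)
    simp only [Nat.add_sub_cancel, hpg] at step
    rw [hset, hcast2]
    obtain ⟨s1, s2, s3, s4⟩ := step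
    refine ⟨s1, s2, s3, ?_⟩
    intro j
    rw [s4 j]
    by_cases h1 : k ≤ j ∧ j < m - 1
    · rw [if_pos h1, if_pos (by omega)]
    · by_cases h2 : j = k - 1
      · subst h2
        rw [if_neg h1, if_pos (by omega)]
        have hlen : k - 1 < a.length := by omega
        have hjk : k - 1 + 1 = k := by omega
        rw [hjk, hpg]
        simp [List.getD, hlen]
      · rw [if_neg h1, if_neg (by omega)]
        simp only [List.getD, List.getElem?_set]
        rw [if_neg (fun hh => h2 hh.symm)]

-- ===== VERDICT (by name: the statement is the Claim_ definition above) =====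
theorem are_polygons_similar_spec : Claim_equal_are_polygons_similar := by
  intro n v hdom hpre
  unfold Spec_are_polygons_similar
  by_cases hodd : PySem.Int.mod n 2 ≠ 0
  · simp only [are_polygons_similar, are_polygons_similar_alt, if_pos hodd]
  · have hmod : PySem.Int.mod n 2 = 0 := by
      by_contra hc; exact hodd hc
    have hpre' : 2 ≤ n ∧ n ≤ (v.length : Int) := by
      rcases hpre with h | h
      · exact absurd hmod h
      · exact h
    obtain ⟨hn2, hnlen⟩ := hpre'
    obtain ⟨m, rfl⟩ : ∃ m : Nat, n = (m : Int) := ⟨n.toNat, by omega⟩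
    have hm2 : 2 ≤ m := by exact_mod_cast hn2
    have hmlen : m ≤ v.length := by exact_mod_cast hnlen
    have hdvd : (2 : Int) ∣ (m : Int) := (PySem.Int.mod_eq_zero_iff_dvd _ _).mp hmod
    obtain ⟨hf, hhf⟩ : ∃ hf : Nat, m = 2 * hf := by
      obtain ⟨c, hc⟩ := hdvd; exact ⟨c.toNat, by omega⟩
    have hf1 : 1 ≤ hf := by omega
    have hfd : PySem.Int.floordiv (m : Int) 2 = (hf : Int) := by
      have h := PySem.Int.floordiv_natCast m 2
      have h2 : m / 2 = hf := by omega
      rw [h2] at h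
      exact_mod_cast h
    have hget0 : PySem.List.pyGet? v (0 : Int) = some (pvG v 0) := by
      have h := pvGet_nat v 0 (by omega)
      simpa using h
    have hgethf : PySem.List.pyGet? v ((hf : Nat) : Int) = some (pvG v hf) :=
      pvGet_nat v hf (by omega)
    rcases hg0 : pvG v 0 with ⟨x1, y1⟩
    rcases hgh : pvG v hf with ⟨xh, yh⟩
    rw [hg0] at hget0
    rw [hgh] at hgethf
    -- loop-1 characterisation
    have spec := pvA_loop1_spec v m hmlen (m-1) 1 (List.replicate m ((0:Int),(0:Int)))
        (by omega) le_rfl (by omega) (by simp)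
    simp only [Nat.cast_one, show (1:Nat) - 1 = 0 from rfl, hg0] at spec
    rcases hres : pvA_loop1 v (PySem.List.pyRange 1 (m : Int) 1) (List.replicate m ((0:Int),(0:Int))) x1 y1
      with ⟨a1, x2, y2⟩
    rw [hres] at spec
    obtain ⟨s1, s2, s3, s4⟩ := spec
    dsimp only at s1 s2 s3 s4
    -- unfold both ports
    simp only [are_polygons_similar, are_polygons_similar_alt, if_neg hodd, hget0, hfd, hgethf,
      Int.toNat_natCast, hres]
    have hcastm1 : ((m : Int) - 1) = ((m - 1 : Nat) : Int) := by omega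
    rw [hcastm1, PySem.List.pySetD_natCast]
    -- the final edge array
    set a2 := a1.set (m-1) (x1 - x2, y1 - y2) with ha2
    have ha2len : a2.length = m := by simp [ha2, s3]
    have hA2 : ∀ j : Nat, j < m →
        a2.getD j (0,0) = if j = m - 1 then (x1 - x2, y1 - y2)
          else ((pvG v (j+1)).1 - (pvG v j).1, (pvG v (j+1)).2 - (pvG v j).2) := by
      intro j hj
      by_cases hj1 : j = m - 1
      · subst hj1
        rw [if_pos rfl, ha2]
        have hlen : m - 1 < a1.length := by omega
        simp [List.getD, hlen]
      · rw [if_neg hj1, ha2]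
        have hd : a1.getD j (0,0) = ((pvG v (j+1)).1 - (pvG v j).1, (pvG v (j+1)).2 - (pvG v j).2) := by
          rw [s4 j, if_pos (by omega)]
        rw [← hd]
        simp only [List.getD, List.getElem?_set]
        rw [if_neg (by omega)]
    have hgetA2 : ∀ j : Nat, j < m → PySem.List.pyGet? a2 ((j : Nat) : Int) = some (a2.getD j (0,0)) := by
      intro j hj
      have hj' : j < a2.length := by omega
      simp [PySem.List.pyGet?_natCast, List.getD, List.getElem?_eq_getElem hj']
    -- the two loop conditions are equivalent
    have hiff : (pvA_check a2 ((hf : Nat) : Int) (PySem.List.pyRange 0 ((hf : Nat) : Int) 1) = true)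
        ↔ (pvB_loop v ((hf : Nat) : Int) (x1 + xh) (y1 + yh) (PySem.List.pyRange 0 ((hf : Nat) : Int) 1) = "YES") := by
      rw [pvA_check_iff_aux a2 ((hf : Nat) : Int) hf 0 ((hf : Nat) : Int) (by omega)]
      rw [pvB_loop_iff_aux v ((hf : Nat) : Int) (x1 + xh) (y1 + yh) hf 0 ((hf : Nat) : Int) (by omega)]
      -- reduce both to Nat-indexed statements
      have hNA : (∀ i : Int, 0 ≤ i → i < ((hf : Nat) : Int) →
          ∃ p q, PySem.List.pyGet? a2 i = some p ∧ PySem.List.pyGet? a2 (((hf : Nat) : Int) + i) = some q ∧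
            p.1 = -q.1 ∧ p.2 = -q.2)
          ↔ (∀ j : Nat, j < hf →
              (a2.getD j (0,0)).1 = -(a2.getD (hf + j) (0,0)).1 ∧
              (a2.getD j (0,0)).2 = -(a2.getD (hf + j) (0,0)).2) := by
        constructor
        · intro h j hj
          obtain ⟨p, q, hp, hq, h1, h2⟩ := h (j : Int) (by omega) (by exact_mod_cast hj)
          rw [hgetA2 j (by omega)] at hp
          rw [show ((hf : Nat) : Int) + (j : Int) = ((hf + j : Nat) : Int) by push_cast; ring,
            hgetA2 (hf + j) (by omega)] at hq
          cases hp; cases hq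
          exact ⟨h1, h2⟩
        · intro h i hi0 hihf
          obtain ⟨j, rfl⟩ : ∃ j : Nat, i = (j : Int) := ⟨i.toNat, by omega⟩
          have hj : j < hf := by exact_mod_cast hihf
          refine ⟨a2.getD j (0,0), a2.getD (hf + j) (0,0), hgetA2 j (by omega), ?_, (h j hj).1, (h j hj).2⟩
          rw [show ((hf : Nat) : Int) + (j : Int) = ((hf + j : Nat) : Int) by push_cast; ring]
          exact hgetA2 (hf + j) (by omega)
      have hNB : (∀ i : Int, 0 ≤ i → i < ((hf : Nat) : Int) →
          ∃ p q, PySem.List.pyGet? v i = some p ∧ PySem.List.pyGet? v (i + ((hf : Nat) : Int)) = some q ∧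
            p.1 + q.1 = x1 + xh ∧ p.2 + q.2 = y1 + yh)
          ↔ (∀ j : Nat, j < hf →
              (pvS v hf j).1 = x1 + xh ∧ (pvS v hf j).2 = y1 + yh) := by
        constructor
        · intro h j hj
          obtain ⟨p, q, hp, hq, h1, h2⟩ := h (j : Int) (by omega) (by exact_mod_cast hj)
          rw [pvGet_nat v j (by omega)] at hp
          rw [show (j : Int) + ((hf : Nat) : Int) = ((j + hf : Nat) : Int) by push_cast; ring,
            pvGet_nat v (j + hf) (by omega)] at hq
          cases hp; cases hq
          exact ⟨h1, h2⟩
        · intro h i hi0 hihf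
          obtain ⟨j, rfl⟩ : ∃ j : Nat, i = (j : Int) := ⟨i.toNat, by omega⟩
          have hj : j < hf := by exact_mod_cast hihf
          refine ⟨pvG v j, pvG v (j + hf), pvGet_nat v j (by omega), ?_, (h j hj).1, (h j hj).2⟩
          rw [show (j : Int) + ((hf : Nat) : Int) = ((j + hf : Nat) : Int) by push_cast; ring]
          exact pvGet_nat v (j + hf) (by omega)
      rw [hNA, hNB]
      -- the core combinatorial equivalence, via the chain lemma on pvS
      constructor
      · intro hA
        have hstep : ∀ i : Nat, i + 1 < hf → pvS v hf (i+1) = pvS v hf i := by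
          intro i hi
          have hc := hA i (by omega)
          rw [hA2 i (by omega), hA2 (hf + i) (by omega)] at hc
          rw [if_neg (by omega), if_neg (by omega)] at hc
          obtain ⟨hc1, hc2⟩ := hc
          dsimp only at hc1 hc2
          have e1 : (pvG v (i+1+hf)).1 = (pvG v (hf+i+1)).1 := by rw [show i+1+hf = hf+i+1 by omega]
          have e2 : (pvG v (i+1+hf)).2 = (pvG v (hf+i+1)).2 := by rw [show i+1+hf = hf+i+1 by omega]
          have e3 : (pvG v (i+hf)).1 = (pvG v (hf+i)).1 := by rw [Nat.add_comm]
          have e4 : (pvG v (i+hf)).2 = (pvG v (hf+i)).2 := by rw [Nat.add_comm]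
          simp only [pvS, Prod.mk.injEq, e1, e2, e3, e4]
          constructor <;> linarith
        have hall := (pvChain (pvS v hf) hf).mp hstep
        intro j hj
        have h0 : pvS v hf 0 = (x1 + xh, y1 + yh) := by
          simp only [pvS, Nat.zero_add, hg0, hgh]
        rw [hall j hj, h0]
        exact ⟨rfl, rfl⟩
      · intro hB
        have hall : ∀ j : Nat, j < hf → pvS v hf j = (x1 + xh, y1 + yh) := by
          intro j hj
          obtain ⟨h1, h2⟩ := hB j hj
          exact Prod.ext h1 h2
        intro j hj
        rw [hA2 j (by omega), hA2 (hf + j) (by omega), if_neg (by omega)]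
        by_cases hjlast : j = hf - 1
        · subst hjlast
          rw [if_pos (by omega)]
          have ha := hall (hf - 1) (by omega)
          simp only [pvS, Prod.mk.injEq] at ha
          obtain ⟨haa1, haa2⟩ := ha
          rw [show hf - 1 + hf = m - 1 by omega] at haa1 haa2
          rw [show hf - 1 + 1 = hf by omega]
          rw [s1, s2]
          have e5 : xh = (pvG v hf).1 := by rw [hgh]
          have e6 : yh = (pvG v hf).2 := by rw [hgh]
          dsimp only
          constructor <;> linarith [haa1, haa2, e5, e6]
        · rw [if_neg (by omega)]
          have ha := hall j hj
          have hb := hall (j+1) (by omega)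
          have hab : pvS v hf (j+1) = pvS v hf j := by rw [ha, hb]
          simp only [pvS, Prod.mk.injEq] at hab
          obtain ⟨hab1, hab2⟩ := hab
          rw [show j+1+hf = hf+j+1 by omega, show j+hf = hf+j by omega] at hab1 hab2
          dsimp only
          constructor <;> linarith
    -- conclude: both strings agree
    rcases pvB_loop_yes_or_no v ((hf : Nat) : Int) (x1 + xh) (y1 + yh) (PySem.List.pyRange 0 ((hf : Nat) : Int) 1) with hB | hB
    · rw [hB, if_pos (hiff.mpr hB)]
    · rw [hB]
      rw [if_neg (fun hA => by rw [hiff.mp hA] at hB; exact absurd hB (by decide))]
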